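-- pv_equiv track=rewrite | github.com/ThrudPrimrose/SC26-Layout-AD | Experiments/E7_FullVelocityTendencies/plot_paper_v2.py | _select_configs
-- ===== SOURCE A (Python) =====
-- def _select_configs(samples_by_key, ts, platforms, requested):
--     """For the given timestep, return the ordered list of configs to
--     plot. If ``requested`` is None, take the union across platforms."""
--     if requested is not None:
--         return list(requested)
--     cfgs = set()
--     for (plat, cfg, ts2), _ in samples_by_key.items():
--         if ts2 == ts and plat in platforms:
--             cfgs.add(cfg)
--     # Stable order: named first (alphabetical), then v123 (alphabetical).
--     named = sorted(c for c in cfgs if not c.startswith("v123_"))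
--     winner = sorted(c for c in cfgs if c.startswith("v123_"))
--     return named + winner
-- ===== SOURCE B (Python) =====
-- def _insert(lst, x):
--     """Return lst (ascending, duplicate-free) with x inserted at its sorted
--     position; unchanged if x is already present."""
--     i = 0
--     n = len(lst)
--     while i < n and lst[i] < x:
--         i += 1
--     if i < n and lst[i] == x:
--         return lst
--     return lst[:i] + [x] + lst[i:]
--
--
-- def _select_configs(samples_by_key, ts, platforms, requested):
--     """For the given timestep, return the ordered list of configs to
--     plot. If ``requested`` is None, take the union across platforms."""
--     if requested is not None:
--         return list(requested)
--     # Single pass: keep two sorted duplicate-free accumulators, one per group,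
--     # filled by ordered insertion; no set and no final sort needed.
--     named = []
--     winner = []
--     for plat, cfg, ts2 in samples_by_key:
--         if ts2 == ts and plat in platforms:
--             if cfg.startswith("v123_"):
--                 winner = _insert(winner, cfg)
--             else:
--                 named = _insert(named, cfg)
--     return named + winner
-- ===== Notes on version B (the rewrite author's own statement) =====
-- stated objective: alternative
-- what changed: B drops A's set and its two filtered sorts: a single pass routes each matching config into one of two sorted duplicate-free accumulator lists via ordered insertion (skipping duplicates), and returns their concatenation.
import Mathlib
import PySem

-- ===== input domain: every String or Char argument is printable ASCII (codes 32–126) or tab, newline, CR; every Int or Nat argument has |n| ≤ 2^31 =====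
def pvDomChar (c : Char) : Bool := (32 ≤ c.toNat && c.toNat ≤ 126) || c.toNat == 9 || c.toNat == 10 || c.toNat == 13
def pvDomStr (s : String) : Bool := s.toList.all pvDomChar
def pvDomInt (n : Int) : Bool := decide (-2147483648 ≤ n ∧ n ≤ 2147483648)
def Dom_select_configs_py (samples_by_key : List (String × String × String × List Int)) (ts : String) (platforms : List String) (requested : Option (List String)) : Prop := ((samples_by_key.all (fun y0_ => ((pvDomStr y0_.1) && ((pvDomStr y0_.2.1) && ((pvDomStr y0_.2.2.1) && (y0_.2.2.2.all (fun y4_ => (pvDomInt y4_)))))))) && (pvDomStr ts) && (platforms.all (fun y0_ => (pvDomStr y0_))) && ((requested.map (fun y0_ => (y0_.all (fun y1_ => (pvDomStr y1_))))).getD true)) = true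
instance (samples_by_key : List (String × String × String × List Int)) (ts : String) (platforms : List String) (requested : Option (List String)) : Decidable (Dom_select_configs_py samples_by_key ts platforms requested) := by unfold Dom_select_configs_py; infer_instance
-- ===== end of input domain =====

-- B replaces A's set-then-two-filtered-sorts with a single pass that ordered-inserts each
-- matching config (skipping duplicates) into one of two sorted accumulator lists: alternative.

-- ===== PORT A =====
def select_configs_py (samples_by_key : List (String × String × String × List Int)) (ts : String) (platforms : List String) (requested : Option (List String)) : List String :=
  match requested with
  | some r => r
  | none =>
    let cfgs : PySem.Set String :=
      samples_by_key.foldl (fun cfgs kv =>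
        if kv.2.2.1 == ts && platforms.contains kv.1 then PySem.Set.add cfgs kv.2.1 else cfgs)
        PySem.Set.empty
    let named := PySem.List.sorted (cfgs.filter (fun c => !(PySem.Str.startswith c "v123_"))) (fun c => c) false
    let winner := PySem.List.sorted (cfgs.filter (fun c => PySem.Str.startswith c "v123_")) (fun c => c) false
    named ++ winner

-- ===== PORT B =====
-- Source B's _insert: scan to x's insertion point in the ascending list, skip if already present.
def insertCfg (lst : List String) (x : String) : List String :=
  match lst with
  | [] => [x]
  | y :: t => if y < x then y :: insertCfg t x else if y == x then y :: t else x :: y :: t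

def select_configs_py_alt (samples_by_key : List (String × String × String × List Int)) (ts : String) (platforms : List String) (requested : Option (List String)) : List String :=
  match requested with
  | some r => r
  | none =>
    let p := samples_by_key.foldl (fun (acc : List String × List String) kv =>
      if kv.2.2.1 == ts && platforms.contains kv.1 then
        if PySem.Str.startswith kv.2.1 "v123_" then (acc.1, insertCfg acc.2 kv.2.1)
        else (insertCfg acc.1 kv.2.1, acc.2)
      else acc) ([], [])
    p.1 ++ p.2

-- ===== PRECONDITION & SPEC =====
def Spec_select_configs_py (samples_by_key : List (String × String × String × List Int)) (ts : String) (platforms : List String) (requested : Option (List String)) (out : List String) : Prop := out = select_configs_py_alt samples_by_key ts platforms requested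
instance (samples_by_key : List (String × String × String × List Int)) (ts : String) (platforms : List String) (requested : Option (List String)) (out : List String) : Decidable (Spec_select_configs_py samples_by_key ts platforms requested out) := by unfold Spec_select_configs_py; infer_instance

-- ===== CLAIM (what is proved, stated in full; the proofs are below) =====
def Claim_equal_select_configs_py : Prop := ∀ (samples_by_key : List (String × String × String × List Int)) (ts : String) (platforms : List String) (requested : Option (List String)), Dom_select_configs_py samples_by_key ts platforms requested → Spec_select_configs_py samples_by_key ts platforms requested (select_configs_py samples_by_key ts platforms requested)

-- ===== LEMMAS AND PROOFS =====

-- inserting a fresh element is exactly PySem's insertion-sort step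
theorem insertCfg_not_mem (x : String) : ∀ (l : List String), x ∉ l →
    insertCfg l x = PySem.List.insertBy (fun a b : String => decide (a < b)) x l := by
  intro l
  induction l with
  | nil => intro _; rfl
  | cons y t ih =>
    intro hx
    have hxy : x ≠ y := fun h => hx (h ▸ List.mem_cons_self)
    have hxt : x ∉ t := fun h => hx (List.mem_cons_of_mem _ h)
    by_cases h : y < x
    · have hnlt : ¬ (x < y) := fun h' => absurd (lt_trans h h') (lt_irrefl y)
      have hne : (y == x) = false := by simp [Ne.symm hxy]
      simp [insertCfg, PySem.List.insertBy, h, hnlt, ih hxt]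
    · have hlt : x < y := lt_of_le_of_ne (le_of_not_gt h) hxy
      simp [insertCfg, PySem.List.insertBy, h, hlt, Ne.symm hxy]

-- inserting a present element into an ascending list is a no-op
theorem insertCfg_mem : ∀ (l : List String), l.Pairwise (fun a b => a ≤ b) → ∀ x ∈ l,
    insertCfg l x = l := by
  intro l
  induction l with
  | nil => intro _ x hx; cases hx
  | cons y t ih =>
    intro hp x hx
    rcases List.mem_cons.mp hx with rfl | hxt
    · simp [insertCfg]
    · have hy : y ≤ x := (List.pairwise_cons.mp hp).1 x hxt
      by_cases hyx : y = x
      · subst hyx; simp [insertCfg]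
      · have hlt : y < x := lt_of_le_of_ne hy hyx
        simp [insertCfg, hlt, ih (List.pairwise_cons.mp hp).2 x hxt]

-- appending one element then sorting = insertBy into the sorted list
theorem srt_append_singleton (m : List String) (c : String) :
    PySem.List.sorted (m ++ [c]) (fun x => x) false
      = PySem.List.insertBy (fun a b : String => decide (a < b)) c (PySem.List.sorted m (fun x => x) false) := by
  rw [PySem.List.sorted_eq_foldl_insertBy, PySem.List.sorted_eq_foldl_insertBy, List.foldl_append]
  rfl

-- one matched element: B's routed insertion tracks A's Set.add on both sorted projections
theorem step_add (p : String → Bool) (s : List String) (_hnd : s.Nodup) (c : String) :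
    (if p c then
       (PySem.List.sorted (s.filter (fun x => !p x)) (fun x => x) false,
        insertCfg (PySem.List.sorted (s.filter p) (fun x => x) false) c)
     else
       (insertCfg (PySem.List.sorted (s.filter (fun x => !p x)) (fun x => x) false) c,
        PySem.List.sorted (s.filter p) (fun x => x) false))
    = (PySem.List.sorted ((PySem.Set.add s c).filter (fun x => !p x)) (fun x => x) false,
       PySem.List.sorted ((PySem.Set.add s c).filter p) (fun x => x) false) := by
  by_cases hc : c ∈ s
  · have hadd : PySem.Set.add s c = s := by simp [PySem.Set.add, hc]
    rw [hadd]
    by_cases hp : p c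
    · have hmem : c ∈ PySem.List.sorted (s.filter p) (fun x => x) false :=
        (PySem.List.mem_sorted _ _ _ _).mpr (List.mem_filter.mpr ⟨hc, hp⟩)
      rw [if_pos hp, insertCfg_mem _ (PySem.List.sorted_pairwise _ _) c hmem]
    · have hmem : c ∈ PySem.List.sorted (s.filter (fun x => !p x)) (fun x => x) false :=
        (PySem.List.mem_sorted _ _ _ _).mpr (List.mem_filter.mpr ⟨hc, by simp [hp]⟩)
      rw [if_neg hp, insertCfg_mem _ (PySem.List.sorted_pairwise _ _) c hmem]
  · have hadd : PySem.Set.add s c = s ++ [c] := by simp [PySem.Set.add, hc]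
    rw [hadd]
    by_cases hp : p c
    · have h1 : (s ++ [c]).filter (fun x => !p x) = s.filter (fun x => !p x) := by
        simp [List.filter_append, hp]
      have h2 : (s ++ [c]).filter p = s.filter p ++ [c] := by
        simp [List.filter_append, hp]
      have hnm : c ∉ PySem.List.sorted (s.filter p) (fun x => x) false := by
        intro h
        exact hc (List.mem_of_mem_filter ((PySem.List.mem_sorted _ _ _ _).mp h))
      rw [if_pos hp, h1, h2, srt_append_singleton, insertCfg_not_mem c _ hnm]
    · have h1 : (s ++ [c]).filter (fun x => !p x) = s.filter (fun x => !p x) ++ [c] := by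
        simp [List.filter_append, hp]
      have h2 : (s ++ [c]).filter p = s.filter p := by
        simp [List.filter_append, hp]
      have hnm : c ∉ PySem.List.sorted (s.filter (fun x => !p x)) (fun x => x) false := by
        intro h
        exact hc (List.mem_of_mem_filter ((PySem.List.mem_sorted _ _ _ _).mp h))
      rw [if_neg hp, h1, h2, srt_append_singleton, insertCfg_not_mem c _ hnm]

-- loop invariant: B's pair of sorted accumulators is the pair of sorted filtered
-- projections of A's set accumulator
theorem pvInv {α : Type} (cond : α → Bool) (f : α → String) (p : String → Bool) :
    ∀ (xs : List α) (s : List String), s.Nodup →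
      xs.foldl (fun (acc : List String × List String) kv =>
          if cond kv then
            if p (f kv) then (acc.1, insertCfg acc.2 (f kv))
            else (insertCfg acc.1 (f kv), acc.2)
          else acc)
        (PySem.List.sorted (s.filter (fun c => !p c)) (fun c => c) false,
         PySem.List.sorted (s.filter p) (fun c => c) false)
      = (PySem.List.sorted ((xs.foldl (fun s kv => if cond kv then PySem.Set.add s (f kv) else s) s).filter (fun c => !p c)) (fun c => c) false,
         PySem.List.sorted ((xs.foldl (fun s kv => if cond kv then PySem.Set.add s (f kv) else s) s).filter p) (fun c => c) false) := by
  intro xs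
  induction xs with
  | nil => intro s _; rfl
  | cons kv t ih =>
    intro s hnd
    by_cases hc : cond kv
    · have hstep := step_add p s hnd (f kv)
      simp only [List.foldl_cons, hc, if_true]
      rw [show (if p (f kv) then
            ((PySem.List.sorted (s.filter (fun c => !p c)) (fun c => c) false,
              PySem.List.sorted (s.filter p) (fun c => c) false).1,
             insertCfg (PySem.List.sorted (s.filter (fun c => !p c)) (fun c => c) false,
              PySem.List.sorted (s.filter p) (fun c => c) false).2 (f kv))
          else
            (insertCfg (PySem.List.sorted (s.filter (fun c => !p c)) (fun c => c) false,
              PySem.List.sorted (s.filter p) (fun c => c) false).1 (f kv),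
             ((PySem.List.sorted (s.filter (fun c => !p c)) (fun c => c) false,
              PySem.List.sorted (s.filter p) (fun c => c) false)).2))
          = (PySem.List.sorted ((PySem.Set.add s (f kv)).filter (fun c => !p c)) (fun c => c) false,
             PySem.List.sorted ((PySem.Set.add s (f kv)).filter p) (fun c => c) false) from hstep]
      exact ih (PySem.Set.add s (f kv)) (PySem.Set.nodup_add s (f kv) hnd)
    · simp only [List.foldl_cons, hc]
      exact ih s hnd

-- ===== VERDICT (by name: the statement is the Claim_ definition above) =====
theorem select_configs_py_spec : Claim_equal_select_configs_py := by
  intro samples_by_key ts platforms requested _hdom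
  unfold Spec_select_configs_py select_configs_py select_configs_py_alt
  cases requested with
  | some r => rfl
  | none =>
    dsimp only []
    have h := pvInv (fun kv : String × String × String × List Int => kv.2.2.1 == ts && platforms.contains kv.1)
      (fun kv => kv.2.1) (fun c => PySem.Str.startswith c "v123_") samples_by_key [] (List.nodup_nil)
    simp only [List.filter_nil] at h
    have h0 : (PySem.List.sorted ([] : List String) (fun c => c) false) = [] := rfl
    rw [h0] at h
    rw [h]
    rfl
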